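-- pv_equiv track=rewrite | github.com/antonpaquin/TsundereAlexa | func.py | japanify
-- ===== SOURCE A (Python) =====
-- def japanify(text):
--     # Makes a decent approximation of the process of turning english into kana
--     # Actually it's not decent, it's pretty bad
--     # I'd like to go through IPA as an intermediate representation or something
--     consonants = set('bcdfghjklmnpqrstvwxyz')
--     kana = {
--         'a', 'i', 'u', 'e', 'o',
--         'ka', 'ki', 'ku', 'ke', 'ko',
--         'sa', 'shi', 'su', 'se', 'so',
--         'ta', 'chi', 'tsu', 'te', 'to',
--         'na', 'ni', 'nu', 'ne', 'no',
--         'ha', 'hi', 'fu', 'he', 'ho',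
--         'ma', 'mi', 'mu', 'me', 'mo',
--         'ya', 'yu', 'yo',
--         'ra', 'ri', 'ru', 're', 'ro',
--         'wa', 'wo',
--         'n',
--         'ga', 'gi', 'gu', 'ge', 'go',
--         'za', 'ji', 'zu', 'ze', 'zo',
--         'da', 'di', 'dsu', 'de', 'do',
--         'ba', 'bi', 'bu', 'be', 'bo',
--         'pa', 'pi', 'pu', 'pe', 'po',
--         'ja', 'ji', 'ju', 'jo',
--         'kya', 'kyu', 'kyo',
--         'sha', 'shu', 'sho',
--         'cha', 'chu', 'cho',
--         'nya', 'nyu', 'nyo',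
--         'hya', 'hyu', 'hyo',
--         'mya', 'myu', 'myo',
--         'rya', 'ryu', 'ryo',
--         'gya', 'gyu', 'gyo',
--         'bya', 'byu', 'byo',
--         'pya', 'pyu', 'pyo',
--     }
--
--     # Do some preprocessing on the text
--     # -- normalize to lowercase,
--     text = text.lower()
--     # And do a bunch of replacements that I just thought of
--     text = text.replace('l', 'r')
--     text = text.replace('hu', 'fu')
--     text = text.replace('th', 'd')
--     text = text.replace('x', 'kusu')
--     text = text.replace('v', 'f')
--     text = text.replace('tu', 'tsu')
--     text = text.replace('q', 'k')
--     text = text.replace('wh', 'w')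
--     text = text.replace('we', 'ue')
--     text = text.replace('wi', 'ui')
--     text = text.replace('wu', 'u')
--     text = text.replace('oo', 'u')
--     # 'c' is 'k' unless it's 'ch'
--     for idx in range(len(text) - 1):
--         if text[idx] == 'c' and text[idx + 1] != 'h':
--             text = text[:idx] + 'k' + text[idx + 1:]
--     # Undouble consonants
--     for char in consonants:
--         text = text.replace(char * 2, char)
--
--     # Now we go through and hopefully everything is kana or easily converted
--     converted = []
--     while text:
--         # Handle whitespace first
--         if text[:1] == ' ':
--             converted.append(' ')
--             text = text[1:]
--             continue
--         if text[:1] in kana: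
--             converted.append(text[:1])
--             text = text[1:]
--             continue
--         if text[:2] in kana:
--             converted.append(text[:2])
--             text = text[2:]
--             continue
--         if text[:3] in kana:
--             converted.append(text[:3])
--             text = text[3:]
--             continue
--         # Meh, we can ignore 'w'
--         if text[:1] == 'w':
--             text = text[1:]
--             continue
--         # 'y' is usually at least somewhat close to 'i'
--         if text[:1] == 'y':
--             converted.append('i')
--             text = text[1:]
--             continue
--         # 'toraburu' 'doragon'
--         if text[:1] in {'t', 'd'}:
--             converted.append(text[:1] + 'o')
--             text = text[1:]
--             continue
--         # For everything else consonant + 'u' is my best guess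
--         converted.append(text[:1] + 'u')
--         text = text[1:]
--
--     return ''.join(converted)
-- ===== SOURCE B (Python) =====
-- def japanify(text):
--     # B: same transliteration pipeline, but the 'c'->'k' fix is a pairwise zip pass and the
--     # greedy kana parse is a single index-pointer scan -- no quadratic string slicing/rebuilding.
--     kana = frozenset(
--         'a i u e o ka ki ku ke ko sa shi su se so ta chi tsu te to na ni nu ne no '
--         'ha hi fu he ho ma mi mu me mo ya yu yo ra ri ru re ro wa wo n '
--         'ga gi gu ge go za ji zu ze zo da di dsu de do ba bi bu be bo pa pi pu pe po '
--         'ja ju jo kya kyu kyo sha shu sho cha chu cho nya nyu nyo hya hyu hyo '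
--         'mya myu myo rya ryu ryo gya gyu gyo bya byu byo pya pyu pyo'.split())
--     s = text.lower()
--     for old, new in (('l', 'r'), ('hu', 'fu'), ('th', 'd'), ('x', 'kusu'),
--                      ('v', 'f'), ('tu', 'tsu'), ('q', 'k'), ('wh', 'w'),
--                      ('we', 'ue'), ('wi', 'ui'), ('wu', 'u'), ('oo', 'u')):
--         s = s.replace(old, new)
--     # 'c' is 'k' unless followed by 'h' (the last char is never changed): one pairwise pass
--     s = ''.join('k' if c == 'c' and d != 'h' else c for c, d in zip(s, s[1:])) + s[-1:]
--     # undouble consonants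
--     for ch in 'bcdfghjklmnpqrstvwxyz':
--         s = s.replace(ch + ch, ch)
--     # greedy shortest-first kana parse with an index pointer over a fixed string
--     out = []
--     i, n = 0, len(s)
--     while i < n:
--         ch = s[i]
--         if ch == ' ':
--             out.append(' ')
--             i += 1
--         elif ch in kana:
--             out.append(ch)
--             i += 1
--         elif s[i:i + 2] in kana:
--             out.append(s[i:i + 2])
--             i += 2
--         elif s[i:i + 3] in kana:
--             out.append(s[i:i + 3])
--             i += 3
--         elif ch == 'w':
--             i += 1
--         elif ch == 'y':
--             out.append('i')
--             i += 1
--         elif ch in ('t', 'd'):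
--             out.append(ch + 'o')
--             i += 1
--         else:
--             out.append(ch + 'u')
--             i += 1
--     return ''.join(out)
-- ===== Notes on version B (the rewrite author's own statement) =====
-- stated objective: faster
-- what changed: The 'c'->'k' fix becomes one pairwise zip pass and the greedy kana parse becomes a single index-pointer scan over a fixed string, replacing A's repeated string slicing/rebuilding (text=text[:idx]+'k'+text[idx+1:] and text=text[k:]) with O(1) pointer moves.
import Mathlib
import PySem

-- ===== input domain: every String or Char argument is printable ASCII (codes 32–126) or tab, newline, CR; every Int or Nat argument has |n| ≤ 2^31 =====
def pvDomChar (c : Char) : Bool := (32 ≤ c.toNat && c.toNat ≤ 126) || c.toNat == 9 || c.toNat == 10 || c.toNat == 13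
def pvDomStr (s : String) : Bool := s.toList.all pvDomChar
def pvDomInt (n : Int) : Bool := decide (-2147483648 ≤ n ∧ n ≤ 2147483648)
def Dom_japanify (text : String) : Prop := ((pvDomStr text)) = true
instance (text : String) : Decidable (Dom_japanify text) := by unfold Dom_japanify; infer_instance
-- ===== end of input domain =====

-- B changes: the 'c'->'k' fix is a pairwise zip pass and the greedy kana parse a single
-- index-pointer scan, instead of A's repeated slice-and-rebuild of the whole string (objective: faster).

-- ===== PORT A =====
-- A's set literals, in written order (the duplicate 'ji' is dropped by set construction).
-- Python iterates these sets only where the result cannot depend on iteration order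
-- (membership tests; per-consonant replaces, which touch disjoint characters).
def kanaA : PySem.Set String := PySem.Set.ofList ["a", "i", "u", "e", "o", "ka", "ki", "ku", "ke", "ko", "sa", "shi", "su", "se", "so", "ta", "chi", "tsu", "te", "to", "na", "ni", "nu", "ne", "no", "ha", "hi", "fu", "he", "ho", "ma", "mi", "mu", "me", "mo", "ya", "yu", "yo", "ra", "ri", "ru", "re", "ro", "wa", "wo", "n", "ga", "gi", "gu", "ge", "go", "za", "ji", "zu", "ze", "zo", "da", "di", "dsu", "de", "do", "ba", "bi", "bu", "be", "bo", "pa", "pi", "pu", "pe", "po", "ja", "ji", "ju", "jo", "kya", "kyu", "kyo", "sha", "shu", "sho", "cha", "chu", "cho", "nya", "nyu", "nyo", "hya", "hyu", "hyo", "mya", "myu", "myo", "rya", "ryu", "ryo", "gya", "gyu", "gyo", "bya", "byu", "byo", "pya", "pyu", "pyo"]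

def consA : PySem.Set Char := PySem.Set.ofList "bcdfghjklmnpqrstvwxyz".toList

-- one step of A's loop: text = text[:idx] + 'k' + text[idx+1:]  (idx is always in range)
def cstepA (t : List Char) (idx : Int) : List Char :=
  if PySem.List.pyGet? t idx = some 'c' ∧ PySem.List.pyGet? t (idx + 1) ≠ some 'h' then
    PySem.List.slice t none (some idx) ++ 'k' :: PySem.List.slice t (some (idx + 1)) none
  else t

-- A's while loop; text[:k] / text[k:] ported as take/drop (exact for these nonnegative bounds)
def parseA : List Char → List String
  | [] => []
  | c :: rest =>
    if String.ofList ((c :: rest).take 1) = " " then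
      " " :: parseA ((c :: rest).drop 1)
    else if kanaA.contains (String.ofList ((c :: rest).take 1)) then
      String.ofList ((c :: rest).take 1) :: parseA ((c :: rest).drop 1)
    else if kanaA.contains (String.ofList ((c :: rest).take 2)) then
      String.ofList ((c :: rest).take 2) :: parseA ((c :: rest).drop 2)
    else if kanaA.contains (String.ofList ((c :: rest).take 3)) then
      String.ofList ((c :: rest).take 3) :: parseA ((c :: rest).drop 3)
    else if String.ofList ((c :: rest).take 1) = "w" then
      parseA ((c :: rest).drop 1)
    else if String.ofList ((c :: rest).take 1) = "y" then
      "i" :: parseA ((c :: rest).drop 1)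
    else if String.ofList ((c :: rest).take 1) = "t" ∨ String.ofList ((c :: rest).take 1) = "d" then
      String.ofList ((c :: rest).take 1 ++ ['o']) :: parseA ((c :: rest).drop 1)
    else
      String.ofList ((c :: rest).take 1 ++ ['u']) :: parseA ((c :: rest).drop 1)
  termination_by t => t.length
  decreasing_by all_goals (simp only [List.length_drop, List.length_cons]; omega)

def japanify (text : String) : String :=
  let t := PySem.Str.lower text
  let t := PySem.Str.replace t "l" "r"
  let t := PySem.Str.replace t "hu" "fu"
  let t := PySem.Str.replace t "th" "d"
  let t := PySem.Str.replace t "x" "kusu"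
  let t := PySem.Str.replace t "v" "f"
  let t := PySem.Str.replace t "tu" "tsu"
  let t := PySem.Str.replace t "q" "k"
  let t := PySem.Str.replace t "wh" "w"
  let t := PySem.Str.replace t "we" "ue"
  let t := PySem.Str.replace t "wi" "ui"
  let t := PySem.Str.replace t "wu" "u"
  let t := PySem.Str.replace t "oo" "u"
  let cs := (PySem.List.pyRange 0 ((PySem.Str.len t : Int) - 1) 1).foldl cstepA t.toList
  let cs := consA.foldl (fun u ch => PySem.Chars.replace u [ch, ch] [ch]) cs
  PySem.Str.join "" (parseA cs)

-- ===== PORT B =====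
def kanaB : PySem.Set String :=
  PySem.Set.ofList (PySem.Str.split₀ "a i u e o ka ki ku ke ko sa shi su se so ta chi tsu te to na ni nu ne no ha hi fu he ho ma mi mu me mo ya yu yo ra ri ru re ro wa wo n ga gi gu ge go za ji zu ze zo da di dsu de do ba bi bu be bo pa pi pu pe po ja ju jo kya kyu kyo sha shu sho cha chu cho nya nyu nyo hya hyu hyo mya myu myo rya ryu ryo gya gyu gyo bya byu byo pya pyu pyo")

def replPairsB : List (String × String) :=
  [("l", "r"), ("hu", "fu"), ("th", "d"), ("x", "kusu"), ("v", "f"), ("tu", "tsu"),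
   ("q", "k"), ("wh", "w"), ("we", "ue"), ("wi", "ui"), ("wu", "u"), ("oo", "u")]

-- ''.join('k' if c=='c' and d!='h' else c for c, d in zip(s, s[1:])) + s[-1:]
def cfixB (s : List Char) : List Char :=
  (s.zip (PySem.List.slice s (some 1) none)).map
      (fun p => if p.1 = 'c' ∧ p.2 ≠ 'h' then 'k' else p.1)
    ++ PySem.List.slice s (some (-1)) none

-- Source B's index-pointer while loop; s[i:i+k] ported as (s.drop i).take k (exact: 0 ≤ i)
def parseB (s : List Char) (i : Nat) : List String :=
  if h : i < s.length then
    let ch := s[i]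
    if ch = ' ' then " " :: parseB s (i + 1)
    else if kanaB.contains (String.ofList [ch]) then String.ofList [ch] :: parseB s (i + 1)
    else if kanaB.contains (String.ofList ((s.drop i).take 2)) then
      String.ofList ((s.drop i).take 2) :: parseB s (i + 2)
    else if kanaB.contains (String.ofList ((s.drop i).take 3)) then
      String.ofList ((s.drop i).take 3) :: parseB s (i + 3)
    else if ch = 'w' then parseB s (i + 1)
    else if ch = 'y' then "i" :: parseB s (i + 1)
    else if ch = 't' ∨ ch = 'd' then String.ofList [ch, 'o'] :: parseB s (i + 1)
    else String.ofList [ch, 'u'] :: parseB s (i + 1)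
  else []
  termination_by s.length - i
  decreasing_by all_goals omega

def japanify_alt (text : String) : String :=
  let s0 := replPairsB.foldl (fun t p => PySem.Str.replace t p.1 p.2) (PySem.Str.lower text)
  let s1 := cfixB s0.toList
  let s2 := "bcdfghjklmnpqrstvwxyz".toList.foldl
    (fun u ch => PySem.Chars.replace u [ch, ch] [ch]) s1
  PySem.Str.join "" (parseB s2 0)

-- ===== PRECONDITION & SPEC =====
def Spec_japanify (text : String) (out : String) : Prop := out = japanify_alt text
instance (text : String) (out : String) : Decidable (Spec_japanify text out) := by
  unfold Spec_japanify; infer_instance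

-- ===== CLAIM (what is proved, stated in full; the proofs are below) =====
def Claim_equal_japanify : Prop := ∀ (text : String), Dom_japanify text → Spec_japanify text (japanify text)

-- ===== LEMMAS AND PROOFS =====
set_option maxRecDepth 8192 in
lemma kana_eq : kanaA = kanaB := by decide

lemma cons_eq : consA = "bcdfghjklmnpqrstvwxyz".toList := by decide

lemma cfixB_nil : cfixB [] = [] := by decide

lemma cfixB_single (c : Char) : cfixB [c] = [c] := by
  simp [cfixB, PySem.List.slice_from_one, PySem.List.slice_from_neg_one]

lemma cfixB_cons (c d : Char) (r : List Char) :
    cfixB (c :: d :: r) = (if c = 'c' ∧ d ≠ 'h' then 'k' else c) :: cfixB (d :: r) := by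
  simp [cfixB, PySem.List.slice_from_one, PySem.List.slice_from_neg_one, List.zip_cons_cons]

lemma cstepA_at (pre : List Char) (c d : Char) (r : List Char) :
    cstepA (pre ++ c :: d :: r) (pre.length : Int)
      = pre ++ (if c = 'c' ∧ d ≠ 'h' then 'k' else c) :: d :: r := by
  have e : pre ++ c :: d :: r = (pre ++ [c]) ++ d :: r := by simp
  have el : (((pre ++ [c]).length : Nat) : Int) = (pre.length : Int) + 1 := by simp
  have h1 : PySem.List.pyGet? (pre ++ c :: d :: r) (pre.length : Int) = some c :=
    PySem.List.pyGet?_append_length pre (d :: r) c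
  have h2 : PySem.List.pyGet? (pre ++ c :: d :: r) ((pre.length : Int) + 1) = some d := by
    rw [e, ← el, PySem.List.pyGet?_append_length (pre ++ [c]) r d]
  have hto : PySem.List.slice (pre ++ c :: d :: r) none (some (pre.length : Int)) = pre := by
    rw [PySem.List.slice_to_natCast, List.take_left]
  have hfrom : PySem.List.slice (pre ++ c :: d :: r) (some ((pre.length : Int) + 1)) none
      = d :: r := by
    rw [e, ← el, PySem.List.slice_from_natCast, List.drop_left]
  unfold cstepA
  rw [h1, h2, hto, hfrom]
  by_cases hc : c = 'c' ∧ d ≠ 'h'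
  · rw [if_pos (by simpa using hc), if_pos hc]
  · rw [if_neg (by simpa using hc), if_neg hc]

lemma cfix_fold (suf pre : List Char) :
    (PySem.List.pyRange (pre.length : Int) ((pre.length : Int) + (suf.length : Int) - 1) 1).foldl
        cstepA (pre ++ suf) = pre ++ cfixB suf := by
  induction suf generalizing pre with
  | nil =>
    rw [PySem.List.pyRange_one_eq_nil (by simp)]
    simp [cfixB_nil]
  | cons c rest ih =>
    cases rest with
    | nil =>
      rw [PySem.List.pyRange_one_eq_nil (by simp)]
      simp [cfixB_single]
    | cons d r =>
      have hb : (pre.length : Int) < (pre.length : Int) + (((c :: d :: r).length : Nat) : Int) - 1 := by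
        simp; omega
      rw [PySem.List.pyRange_one_cons hb, List.foldl_cons, cstepA_at]
      have e : pre ++ (if c = 'c' ∧ d ≠ 'h' then 'k' else c) :: d :: r
          = (pre ++ [if c = 'c' ∧ d ≠ 'h' then 'k' else c]) ++ d :: r := by simp
      rw [e]
      have ih' := ih (pre ++ [if c = 'c' ∧ d ≠ 'h' then 'k' else c])
      have hlen : (((pre ++ [if c = 'c' ∧ d ≠ 'h' then 'k' else c]).length : Nat) : Int)
          = (pre.length : Int) + 1 := by simp
      rw [hlen] at ih'
      have hbound : (pre.length : Int) + 1 + (((d :: r).length : Nat) : Int) - 1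
          = (pre.length : Int) + (((c :: d :: r).length : Nat) : Int) - 1 := by
        simp only [List.length_cons]; push_cast; ring
      rw [hbound] at ih'
      rw [ih', cfixB_cons]
      simp

lemma cfix_main (cs : List Char) :
    (PySem.List.pyRange 0 ((cs.length : Int) - 1) 1).foldl cstepA cs = cfixB cs := by
  have h := cfix_fold cs []
  simpa using h

lemma lit_space : (" " : String) = String.ofList [' '] := rfl
lemma lit_w : ("w" : String) = String.ofList ['w'] := rfl
lemma lit_y : ("y" : String) = String.ofList ['y'] := rfl
lemma lit_t : ("t" : String) = String.ofList ['t'] := rfl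
lemma lit_d : ("d" : String) = String.ofList ['d'] := rfl

lemma ofList_single_iff (x y : Char) : String.ofList [x] = String.ofList [y] ↔ x = y := by
  constructor
  · intro h
    have := congrArg String.toList h
    simpa using this
  · intro h; rw [h]

lemma parse_eq (k : Nat) (s : List Char) (i : Nat) (hk : s.length - i ≤ k) :
    parseB s i = parseA (s.drop i) := by
  induction k generalizing i with
  | zero =>
    have hle : s.length ≤ i := by omega
    rw [parseB, dif_neg (by omega), List.drop_eq_nil_of_le hle, parseA]
  | succ k ih =>
    by_cases h : i < s.length
    · rw [parseB, dif_pos h]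
      have hdrop : s.drop i = s[i] :: s.drop (i + 1) := List.drop_eq_getElem_cons h
      rw [hdrop, parseA]
      have d2 : (s.drop (i + 1)).drop 1 = s.drop (i + 2) := by
        rw [List.drop_drop]
      have d3 : (s.drop (i + 1)).drop 2 = s.drop (i + 3) := by
        rw [List.drop_drop]
      simp only [List.take_succ_cons, List.take_zero, List.drop_succ_cons, List.drop_zero,
        List.singleton_append, d2, d3, kana_eq, lit_space, lit_w, lit_y, lit_t, lit_d,
        ofList_single_iff]
      split_ifs <;> first
        | exact ih _ (by omega)
        | exact congrArg (List.cons _) (ih _ (by omega))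
    · rw [parseB, dif_neg h, List.drop_eq_nil_of_le (by omega), parseA]

lemma parse_main (cs : List Char) : parseB cs 0 = parseA cs := by
  simpa using parse_eq cs.length cs 0 (by omega)

-- ===== VERDICT (by name: the statement is the Claim_ definition above) =====
theorem japanify_spec : Claim_equal_japanify := by
  intro text _
  unfold Spec_japanify japanify japanify_alt
  simp only [replPairsB, List.foldl_cons, List.foldl_nil, cons_eq]
  rw [parse_main]
  simp only [PySem.Str.len_eq]
  rw [cfix_main]
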